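-- pv_equiv track=rewrite | github.com/avuign/Femto_GPT | data.py | text_to_input
-- ===== SOURCE A (Python) =====
-- def text_to_input(words, context_size, dic):
--     contexts = []
--     targets = []
--     for i in range(0, len(words) - context_size):
--         window = words[i : i + context_size]
--         target = words[i + context_size]
--
--         context = []
--         for word in window:
--             context.append(dic[word])
--
--         contexts.append(context)
--         targets.append(dic[target])
--     return contexts, targets
-- ===== SOURCE B (Python) =====
-- def text_to_input(words, context_size, dic):
--     n = len(words) - context_size
--     if n <= 0:
--         return [], []
--     ids = [dic[w] for w in words]
--     contexts = [ids[i : i + context_size] for i in range(n)]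
--     targets = ids[context_size:]
--     return contexts, targets
-- ===== Notes on version B (the rewrite author's own statement) =====
-- stated objective: simpler
-- what changed: B replaces the nested per-window dict-lookup loop by one table pass ids=[dic[w] for w in words] (guarded so no lookup happens when the window loop is empty) followed by plain slicing: contexts are ids[i:i+context_size] and targets are the single slice ids[context_size:].
-- outside the precondition, e.g. on text_to_input(['a'], -1, {'a': 0}): A returns ([[], []], [0, 0]), B returns ([[], []], [0])
import Mathlib
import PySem

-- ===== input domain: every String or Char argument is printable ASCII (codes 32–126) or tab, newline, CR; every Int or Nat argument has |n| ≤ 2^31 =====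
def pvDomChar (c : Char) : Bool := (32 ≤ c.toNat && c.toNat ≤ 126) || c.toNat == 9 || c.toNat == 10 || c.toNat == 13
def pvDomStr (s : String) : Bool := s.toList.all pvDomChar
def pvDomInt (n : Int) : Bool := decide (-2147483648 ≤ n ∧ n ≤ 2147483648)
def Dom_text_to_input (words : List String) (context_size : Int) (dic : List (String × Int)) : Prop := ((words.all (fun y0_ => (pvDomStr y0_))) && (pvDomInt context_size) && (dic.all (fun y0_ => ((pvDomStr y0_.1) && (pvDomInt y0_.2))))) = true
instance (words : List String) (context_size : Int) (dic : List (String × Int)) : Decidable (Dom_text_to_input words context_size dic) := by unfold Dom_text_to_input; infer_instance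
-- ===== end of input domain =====

-- B builds the id table once and produces contexts/targets by slicing instead of nested per-window dict lookups (objective: simpler).

-- shared helper: dic[w] (Pre_ guarantees the key is present wherever a lookup happens)
def pvLook (dic : List (String × Int)) (w : String) : Int :=
  ((PySem.Dict.ofList dic).get? w).getD 0

-- ===== PORT A =====
def text_to_input (words : List String) (context_size : Int) (dic : List (String × Int)) : List (List Int) × List Int :=
  (PySem.List.pyRange 0 ((words.length : Int) - context_size) 1).foldl
    (fun acc i =>
      let window := PySem.List.slice words (some i) (some (i + context_size))
      let target := (PySem.List.pyGet? words (i + context_size)).getD ""   -- Pre_ keeps the index in range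
      let context := window.foldl (fun c w => c ++ [pvLook dic w]) []
      (acc.1 ++ [context], acc.2 ++ [pvLook dic target]))
    ([], [])

-- ===== PORT B =====
def text_to_input_alt (words : List String) (context_size : Int) (dic : List (String × Int)) : List (List Int) × List Int :=
  let n : Int := (words.length : Int) - context_size
  if n ≤ 0 then ([], [])
  else
    let ids := words.map (pvLook dic)
    ((PySem.List.pyRange 0 n 1).map (fun i => PySem.List.slice ids (some i) (some (i + context_size))),
     PySem.List.slice ids (some context_size) none)

-- ===== PRECONDITION & SPEC =====
-- Pre_ excludes negative context_size — a window count, on which A's target index words[i+context_size]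
-- goes negative and relies on Python's negative-index wraparound (outside the natural domain) — and inputs
-- where the window loop runs but some word is missing from dic, on which A raises KeyError.
def Pre_text_to_input (words : List String) (context_size : Int) (dic : List (String × Int)) : Prop :=
  0 ≤ context_size ∧
    ((words.length : Int) ≤ context_size ∨
      ∀ w ∈ words, ((PySem.Dict.ofList dic).get? w).isSome = true)
instance (words : List String) (context_size : Int) (dic : List (String × Int)) : Decidable (Pre_text_to_input words context_size dic) := by unfold Pre_text_to_input; infer_instance
def pvWitness_text_to_input : List String × Int × (List (String × Int)) :=
  (["a", "b", "c"], 1, [("a", 5), ("b", 6), ("c", 7)])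
def Spec_text_to_input (words : List String) (context_size : Int) (dic : List (String × Int)) (out : List (List Int) × List Int) : Prop := out = text_to_input_alt words context_size dic
instance (words : List String) (context_size : Int) (dic : List (String × Int)) (out : List (List Int) × List Int) : Decidable (Spec_text_to_input words context_size dic out) := by unfold Spec_text_to_input; infer_instance

-- ===== CLAIM (what is proved, stated in full; the proofs are below) =====
def Claim_equal_text_to_input : Prop := ∀ (words : List String) (context_size : Int) (dic : List (String × Int)), Dom_text_to_input words context_size dic → Pre_text_to_input words context_size dic → Spec_text_to_input words context_size dic (text_to_input words context_size dic)

-- ===== LEMMAS AND PROOFS =====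

-- slicing commutes with mapping the lookup over the word list (nonnegative bounds)
theorem pvSlice_map (words : List String) (dic : List (String × Int)) (a b : Int)
    (ha : 0 ≤ a) (hb : 0 ≤ b) :
    (PySem.List.slice words (some a) (some b)).map (pvLook dic)
      = PySem.List.slice (words.map (pvLook dic)) (some a) (some b) := by
  rw [PySem.List.slice_toNat words ha hb, PySem.List.slice_toNat (words.map (pvLook dic)) ha hb]
  simp [List.map_take, List.map_drop]

theorem pvMain (words : List String) (context_size : Int) (dic : List (String × Int))
    (hcs : 0 ≤ context_size) :
    text_to_input words context_size dic = text_to_input_alt words context_size dic := by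
  unfold text_to_input text_to_input_alt
  by_cases hn : (words.length : Int) - context_size ≤ 0
  · rw [PySem.List.pyRange_one_eq_nil (by omega)]
    simp [hn]
  · simp only [hn, ite_false]
    rw [PySem.List.foldl_prod_mk
        (f := fun acc i => acc ++ [(PySem.List.slice words (some i) (some (i + context_size))).foldl
                (fun c w => c ++ [pvLook dic w]) []])
        (g := fun acc i => acc ++ [pvLook dic ((PySem.List.pyGet? words (i + context_size)).getD "")])]
    rw [PySem.List.foldl_append_singleton_eq_map, PySem.List.foldl_append_singleton_eq_map]
    simp only [List.nil_append]
    rw [Prod.mk.injEq]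
    refine ⟨?_, ?_⟩
    · -- contexts
      apply List.map_congr_left
      intro i hi
      have h0i : 0 ≤ i := (PySem.List.mem_pyRange_one.mp hi).1
      rw [PySem.List.foldl_append_singleton_eq_map]
      simp only [List.nil_append]
      exact pvSlice_map words dic i (i + context_size) h0i (by omega)
    · -- targets
      have hshift : PySem.List.pyRange 0 ((words.length : Int) - context_size) 1
            = (PySem.List.pyRange context_size (words.length : Int) 1).map (fun j => j - context_size) := by
        rw [PySem.List.pyRange_one, PySem.List.pyRange_one]
        simp only [List.map_map, Int.sub_zero]
        apply List.map_congr_left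
        intro k _
        simp [Function.comp]
      have hget : ∀ j : Int, pvLook dic ((PySem.List.pyGet? words j).getD "")
            = PySem.List.pyGetD (words.map (pvLook dic)) j (pvLook dic "") := by
        intro j
        rw [PySem.List.pyGetD_map]
        rfl
      have hcomp : ((fun i => pvLook dic ((PySem.List.pyGet? words (i + context_size)).getD ""))
              ∘ fun j => j - context_size)
            = fun j => PySem.List.pyGetD (words.map (pvLook dic)) j (pvLook dic "") := by
        funext j
        simp only [Function.comp_apply, sub_add_cancel]
        exact hget j
      have hlen : ((words.length : Int)) = (((words.map (pvLook dic)).length : Int)) := by simp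
      rw [hshift, List.map_map, hcomp, hlen,
        PySem.List.map_pyGetD_pyRange' (words.map (pvLook dic)) (pvLook dic "") hcs,
        PySem.List.slice_from _ hcs]

-- ===== VERDICT (by name: the statement is the Claim_ definition above) =====
theorem text_to_input_spec : Claim_equal_text_to_input := by
  intro words cs dic _ hpre
  unfold Spec_text_to_input
  exact pvMain words cs dic hpre.1
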